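-- pv_equiv track=rewrite | github.com/lambdafate/leetcode | written-test/ByteDance-19sp/test1.py | solve
-- ===== SOURCE A (Python) =====
-- def solve(s):
--     chars = list(s)
--     i = 0
--     while i < len(chars) - 2:
--         if chars[i] != chars[i+1]:
--             i += 1
--             continue
--         if chars[i] == chars[i+2]:
--             chars.pop(i + 2)
--             continue
--         if i + 3 < len(chars) and chars[i + 2] == chars[i + 3]:
--             chars.pop(i + 3)
--         else:
--             i += 1
--     return "".join(chars)
-- ===== SOURCE B (Python) =====
-- def solve(s):
--     st = []
--     for c in s:
--         st.append(c)
--         if len(st) >= 3 and st[-1] == st[-2] == st[-3]: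
--             st.pop()
--         elif len(st) >= 4 and st[-1] == st[-2] and st[-3] == st[-4]:
--             st.pop()
--     return "".join(st)
-- ===== Notes on version B (the rewrite author's own statement) =====
-- stated objective: faster
-- what changed: Replaced A's index-pointer loop over a mutable list with repeated O(n) pops (quadratic on pop-heavy inputs) by a single left-to-right stack pass that pushes each character and pops when the top three are equal or the top four form two adjacent equal pairs.
import Mathlib
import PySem

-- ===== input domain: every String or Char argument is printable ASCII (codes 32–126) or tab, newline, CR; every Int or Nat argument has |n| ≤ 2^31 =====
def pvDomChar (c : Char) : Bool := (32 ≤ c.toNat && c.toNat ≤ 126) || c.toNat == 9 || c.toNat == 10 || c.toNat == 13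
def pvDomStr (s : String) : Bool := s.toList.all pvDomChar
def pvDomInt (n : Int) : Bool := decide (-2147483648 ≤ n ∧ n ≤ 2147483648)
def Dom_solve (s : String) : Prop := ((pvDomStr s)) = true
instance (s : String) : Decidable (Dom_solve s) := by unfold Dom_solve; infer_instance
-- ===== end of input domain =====

-- B replaces A's index-pointer loop with O(n) pops by a single left-to-right stack pass
-- (push each char, pop when the top 3 are equal or the top 4 form two adjacent equal pairs);
-- objective: faster (asymptotic).


-- ===== PORT A =====
-- literal transliteration of A's while loop: pointer i over a mutable char list;
-- `i < len(chars) - 2` (Python int arithmetic) is `i + 2 < chars.length` since i ≥ 0;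
-- `chars.pop(k)` at a valid index is `List.eraseIdx chars k`.
def solveLoop (chars : List Char) (i : Nat) : List Char :=
  if h : i + 2 < chars.length then
    if chars[i]'(by omega) ≠ chars[i+1]'(by omega) then
      solveLoop chars (i+1)
    else if chars[i]'(by omega) = chars[i+2]'h then
      solveLoop (chars.eraseIdx (i+2)) i
    else if h3 : i + 3 < chars.length then
      if chars[i+2]'h = chars[i+3]'h3 then
        solveLoop (chars.eraseIdx (i+3)) i
      else
        solveLoop chars (i+1)
    else
      solveLoop chars (i+1)
  else chars
termination_by chars.length * 2 - i
decreasing_by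
  · omega
  · simp [List.length_eraseIdx]; split <;> omega
  · simp [List.length_eraseIdx]; split <;> omega
  · omega
  · omega

def solve (s : String) : String := String.mk (solveLoop s.toList 0)

-- ===== PORT B =====
-- literal transliteration of B: the stack is kept reversed (top = head), so
-- `st.append(c)` is `c :: st` and `st.pop()` drops the head; the two pop
-- conditions check the top 3 resp. top 4 elements exactly as in Source B.
def stepB (st : List Char) (c : Char) : List Char :=
  match st with
  | b :: a :: rest =>
      if c = b ∧ b = a then st            -- pushed c, top 3 equal, popped c
      else
        match rest with
        | d :: _ => if c = b ∧ a = d then st else c :: st   -- pushed c, top 4 = two equal pairs, popped c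
        | [] => c :: st
  | _ => c :: st

def solve_alt (s : String) : String := String.mk ((s.toList.foldl stepB []).reverse)

-- ===== PRECONDITION & SPEC =====
def Spec_solve (s : String) (out : String) : Prop := out = solve_alt s
instance (s : String) (out : String) : Decidable (Spec_solve s out) := by unfold Spec_solve; infer_instance

-- ===== CLAIM (what is proved, stated in full; the proofs are below) =====
def Claim_equal_solve : Prop := ∀ (s : String), Dom_solve s → Spec_solve s (solve s)

-- ===== LEMMAS AND PROOFS =====

-- invariant part 1: the committed prefix contains no three equal adjacent chars
def NoTri (p : List Char) : Prop :=
  ∀ j, (hj : j + 2 < p.length) →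
    ¬(p[j]'(by omega) = p[j+1]'(by omega) ∧ p[j+1]'(by omega) = p[j+2]'hj)

-- invariant part 2: the pair rule does not fire across the boundary at i
def PairOK (l : List Char) (i : Nat) : Prop :=
  ∀ (_ : 1 ≤ i) (h : i + 2 < l.length),
    ¬(l[i-1]'(by omega) = l[i]'(by omega) ∧ l[i+1]'(by omega) = l[i+2]'h)

lemma take_reverse_one (l : List Char) (i : Nat) (h : i < l.length) :
    (l.take (i+1)).reverse = l[i] :: (l.take i).reverse := by
  rw [List.take_add_one]
  simp [List.getElem?_eq_getElem h]

lemma take_reverse_two (l : List Char) (i : Nat) (h : i + 1 < l.length) :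
    (l.take (i+2)).reverse = l[i+1] :: l[i]'(by omega) :: (l.take i).reverse := by
  rw [show i+2 = (i+1)+1 from rfl, take_reverse_one l (i+1) h,
    take_reverse_one l i (by omega)]

lemma noTri_extend (l : List Char) (i : Nat) (hi2 : i + 2 < l.length)
    (htri : NoTri (l.take (i+2)))
    (hno : ¬(l[i]'(by omega) = l[i+1]'(by omega) ∧ l[i+1]'(by omega) = l[i+2]'hi2)) :
    NoTri (l.take (i+3)) := by
  intro j hj
  by_cases hji : j + 2 < i + 2
  · have hjj : j + 2 < (l.take (i+2)).length := by simp at hj ⊢; omega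
    have := htri j hjj
    simp only [List.getElem_take] at this ⊢
    exact this
  · have hji' : j = i := by simp at hj; omega
    subst hji'
    simp only [List.getElem_take]
    exact hno

lemma loop_eq (l : List Char) (i : Nat)
    (htri : NoTri (l.take (i+2))) (hpo : PairOK l i) :
    solveLoop l i = (List.foldl stepB ((l.take (i+2)).reverse) (l.drop (i+2))).reverse := by
  rw [solveLoop]
  by_cases h : i + 2 < l.length
  · simp only [dif_pos h]
    have hi : i < l.length := by omega
    have hi1 : i + 1 < l.length := by omega
    set a := l[i]'hi with ha
    set b := l[i+1]'hi1 with hb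
    set c := l[i+2]'h with hc
    have hst : (l.take (i+2)).reverse = b :: a :: (l.take i).reverse :=
      take_reverse_two l i hi1
    have hdrop : l.drop (i+2) = c :: l.drop (i+3) := List.drop_eq_getElem_cons h
    have hlen : l.length ≥ i + 3 := by omega
    by_cases hab : a = b
    · rw [if_neg (not_not_intro hab)]
      by_cases hac : a = c
      · -- triple pop: erase index i+2, stay at i
        rw [if_pos hac]
        have herase : l.eraseIdx (i+2) = l.take (i+2) ++ l.drop (i+3) :=
          List.eraseIdx_eq_take_drop_succ l (i+2)
        have htk : (l.eraseIdx (i+2)).take (i+2) = l.take (i+2) := by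
          rw [herase, List.take_append_of_le_length (by simp; omega)]
          simp
        have hdr : (l.eraseIdx (i+2)).drop (i+2) = l.drop (i+3) := by
          rw [herase, List.drop_append_of_le_length (by simp; omega)]
          simp
        rw [loop_eq (l.eraseIdx (i+2)) i ?_ ?_]
        · rw [htk, hdr, hdrop]
          have hstep : stepB ((l.take (i+2)).reverse) c = (l.take (i+2)).reverse := by
            rw [hst]
            simp only [stepB]
            rw [if_pos ⟨hac.symm.trans hab, hab.symm⟩]
          rw [List.foldl_cons, hstep]
        · rw [htk]; exact htri
        · -- PairOK (l.eraseIdx (i+2)) i : uses NoTri at j = i-1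
          intro h1 h2
          have hda : (l.eraseIdx (i+2))[i-1]'(by omega) = l[i-1]'(by omega) :=
            List.getElem_eraseIdx_of_lt _ (by omega)
          have haa : (l.eraseIdx (i+2))[i]'(by omega) = a :=
            List.getElem_eraseIdx_of_lt _ (by omega)
          have hne : l[i-1]'(by omega) ≠ a := by
            have hjj : (i-1) + 2 < (l.take (i+2)).length := by simp; omega
            have := htri (i-1) hjj
            simp only [List.getElem_take] at this
            intro hcon
            exact this ⟨by simpa [show i - 1 + 1 = i by omega] using hcon,
              by simpa [show i - 1 + 1 = i by omega, show i - 1 + 2 = i + 1 by omega] using hab⟩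
          rintro ⟨h3, -⟩
          exact hne (by rw [← hda, ← haa]; exact h3)
      · -- a = b, a ≠ c
        rw [if_neg hac]
        have hpushc : stepB ((l.take (i+2)).reverse) c = c :: (l.take (i+2)).reverse := by
          rw [hst]
          simp only [stepB]
          rw [if_neg (fun hh => hac (hab.trans hh.1.symm))]
          cases (l.take i).reverse with
          | nil => rfl
          | cons d r =>
            show (if c = b ∧ a = d then b :: a :: d :: r else c :: b :: a :: d :: r) = _
            rw [if_neg (fun hh => hac (hab.trans hh.1.symm))]
        have hcstack : c :: (l.take (i+2)).reverse = (l.take (i+3)).reverse := by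
          rw [show i+3 = (i+2)+1 from rfl, take_reverse_one l (i+2) h, hc]
        by_cases h3 : i + 3 < l.length
        · rw [dif_pos h3]
          set e := l[i+3]'h3 with he
          by_cases hce : c = e
          · -- pair pop: erase index i+3, stay at i
            rw [if_pos hce]
            have herase : l.eraseIdx (i+3) = l.take (i+3) ++ l.drop (i+4) :=
              List.eraseIdx_eq_take_drop_succ l (i+3)
            have htk : (l.eraseIdx (i+3)).take (i+2) = l.take (i+2) := by
              rw [herase, List.take_append_of_le_length (by simp; omega), List.take_take]
              congr 1
              omega
            have hdr : (l.eraseIdx (i+3)).drop (i+2) = c :: l.drop (i+4) := by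
              rw [herase, List.drop_append_of_le_length (by simp; omega)]
              have htkdr : (l.take (i+3)).drop (i+2) = [c] := by
                rw [show i+3 = (i+2)+1 from rfl, List.take_add_one,
                  List.drop_append_of_le_length (by simp; omega)]
                simp [List.getElem?_eq_getElem h, hc]
              rw [htkdr]; rfl
            rw [loop_eq (l.eraseIdx (i+3)) i ?_ ?_]
            · rw [htk, hdr, hdrop]
              have hdrop3 : l.drop (i+3) = e :: l.drop (i+4) := List.drop_eq_getElem_cons h3
              rw [hdrop3]
              rw [List.foldl_cons, List.foldl_cons, List.foldl_cons, hpushc]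
              have hstep2 : stepB (c :: (l.take (i+2)).reverse) e = c :: (l.take (i+2)).reverse := by
                rw [hst]
                simp only [stepB]
                rw [if_neg (fun hh => hac (hab.trans hh.2.symm)),
                  if_pos ⟨hce.symm, hab.symm⟩]
              rw [hstep2]
            · rw [htk]; exact htri
            · -- PairOK (l.eraseIdx (i+3)) i : l'[i+1] = b, l'[i+2] = c, b ≠ c
              intro h1 h2
              have hb' : (l.eraseIdx (i+3))[i+1]'(by omega) = b :=
                List.getElem_eraseIdx_of_lt _ (by omega)
              have hc' : (l.eraseIdx (i+3))[i+2]'(by omega) = c :=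
                List.getElem_eraseIdx_of_lt _ (by omega)
              rintro ⟨-, h4⟩
              rw [hb', hc'] at h4
              exact hac (hab.trans h4)
          · -- a = b, a ≠ c, c ≠ e : advance
            rw [if_neg hce]
            rw [loop_eq l (i+1)
              (noTri_extend l i h htri (fun hh => hac (hh.1.trans hh.2))) ?_]
            · rw [hdrop, List.foldl_cons, hpushc, hcstack]
            · intro h1 h2
              rintro ⟨-, h4⟩
              exact hce h4
        · -- i + 3 ≥ len : advance
          rw [dif_neg h3]
          rw [loop_eq l (i+1)
            (noTri_extend l i h htri (fun hh => hac (hh.1.trans hh.2))) ?_]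
          · rw [hdrop, List.foldl_cons, hpushc, hcstack]
          · intro h1 h2
            omega
    · -- a ≠ b : advance; PairOK is what keeps the push from pair-popping
      rw [if_pos hab]
      have hpushc : stepB ((l.take (i+2)).reverse) c = c :: (l.take (i+2)).reverse := by
        rw [hst]
        simp only [stepB]
        rw [if_neg (fun hh => hab hh.2.symm)]
        cases hrest : (l.take i).reverse with
        | nil => rfl
        | cons d r =>
          have hi0 : 1 ≤ i := by
            by_contra hi0
            have h0 : i = 0 := by omega
            rw [h0] at hrest
            simp at hrest
          have hd : d = l[i-1]'(by omega) := by
            have hr1 := take_reverse_one l (i-1) (by omega)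
            rw [show (i-1)+1 = i by omega] at hr1
            rw [hr1] at hrest
            exact (List.cons_eq_cons.mp hrest).1.symm
          show (if c = b ∧ a = d then b :: a :: d :: r else c :: b :: a :: d :: r) = _
          rw [if_neg]
          rintro ⟨hcb, had⟩
          exact hpo hi0 h ⟨hd ▸ had.symm, hcb.symm⟩
      rw [loop_eq l (i+1)
        (noTri_extend l i h htri (fun hh => hab hh.1)) ?_]
      · rw [hdrop, List.foldl_cons, hpushc]
        congr 2
        rw [show i+3 = (i+2)+1 from rfl, take_reverse_one l (i+2) h, hc]
      · intro h1 h2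
        rintro ⟨h3, -⟩
        exact hab h3
  · -- loop exit: everything consumed
    rw [dif_neg h]
    rw [List.drop_eq_nil_of_le (by omega), List.take_of_length_le (by omega)]
    simp
termination_by l.length * 2 - i
decreasing_by
  · simp [List.length_eraseIdx]; split <;> omega
  · simp [List.length_eraseIdx]; split <;> omega
  · omega
  · omega
  · omega

lemma foldl_init (l : List Char) :
    List.foldl stepB [] l = List.foldl stepB ((l.take 2).reverse) (l.drop 2) := by
  match l with
  | [] => rfl
  | [x] => rfl
  | x :: y :: t => rfl

-- ===== VERDICT (by name: the statement is the Claim_ definition above) =====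
theorem solve_spec : Claim_equal_solve := by
  intro s _
  unfold Spec_solve solve solve_alt
  congr 1
  have h1 : NoTri (s.toList.take 2) := by
    intro j hj
    simp at hj
  have h2 : PairOK s.toList 0 := by
    intro h0 _
    exact absurd h0 (by omega)
  rw [loop_eq s.toList 0 h1 h2, foldl_init]
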